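-- pv_equiv track=rewrite | github.com/LegendaryGretl/AdventOfCode2023 | d14/math_rocks.py | calc_force_north
-- ===== SOURCE A (Python) =====
-- def calc_force_north(coord, map):
--     f_max = len(map)
--     num_obs = 0
--     for row in reversed(range(0, coord[0])):
--         if map[row][coord[1]] == "O":
--             num_obs += 1
--         elif map[row][coord[1]] == "#":
--             f_max = len(map) - row -1
--             break
--     return f_max - num_obs
-- ===== SOURCE B (Python) =====
-- def calc_force_north(coord, map):
--     # pass 1: locate the nearest wall '#' strictly above the coordinate (-1 if none)
--     wall = -1
--     for row in reversed(range(coord[0])):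
--         if map[row][coord[1]] == "#":
--             wall = row
--             break
--     # pass 2: count rolling rocks between the wall and the coordinate, scanning forward
--     num_obs = sum(1 for r in range(wall + 1, coord[0]) if map[r][coord[1]] == "O")
--     f_max = len(map) - wall - 1 if wall >= 0 else len(map)
--     return f_max - num_obs
-- ===== Notes on version B (the rewrite author's own statement) =====
-- stated objective: alternative
-- what changed: Replaces A's fused reverse scan (which interleaves counting 'O's with breaking at the first '#') by two separate passes: first locate the nearest '#' wall above the coordinate, then count the 'O's in the forward range between the wall and the coordinate and combine with a closed-form f_max.
import Mathlib
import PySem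

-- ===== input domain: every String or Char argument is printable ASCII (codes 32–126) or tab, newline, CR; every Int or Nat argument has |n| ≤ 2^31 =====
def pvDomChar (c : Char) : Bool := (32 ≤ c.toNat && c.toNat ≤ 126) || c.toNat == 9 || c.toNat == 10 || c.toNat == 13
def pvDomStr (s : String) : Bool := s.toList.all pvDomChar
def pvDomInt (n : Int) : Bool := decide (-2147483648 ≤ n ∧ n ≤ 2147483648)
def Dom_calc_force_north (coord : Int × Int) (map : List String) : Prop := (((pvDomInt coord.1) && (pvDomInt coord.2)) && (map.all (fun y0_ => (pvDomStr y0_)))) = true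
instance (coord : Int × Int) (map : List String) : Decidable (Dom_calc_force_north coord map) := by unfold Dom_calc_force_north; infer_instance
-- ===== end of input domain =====

-- B replaces A's fused reverse scan (counting and breaking in one loop) by two separate
-- passes: locate the nearest '#' wall above the coordinate, then count the 'O's in the
-- forward range between the wall and the coordinate (objective: alternative decomposition).

-- ===== PORT A =====
-- shared cell access map[r][col]: none = IndexError (both Pythons index cells exactly like this)
def pvChar (map : List String) (col : Int) (r : Int) : Option Char :=
  match PySem.List.pyGet? map r with
  | none => none
  | some s => PySem.Str.pyGet? s col

-- A's loop: 'for row in reversed(range(0, coord[0]))' with the break returning directly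
def pvLoopA (map : List String) (col : Int) (fmax num : Int) : List Int → Int
  | [] => fmax - num
  | r :: rs =>
    match pvChar map col r with
    | none => 0  -- IndexError in Python; excluded by Pre_
    | some ch =>
      if ch = 'O' then pvLoopA map col fmax (num + 1) rs
      else if ch = '#' then ((map.length : Int) - r - 1) - num
      else pvLoopA map col fmax num rs

def calc_force_north (coord : Int × Int) (map : List String) : Int :=
  pvLoopA map coord.2 (map.length : Int) 0 ((PySem.List.pyRange 0 coord.1 1).reverse)

-- ===== PORT B =====
-- B's pass 1: 'wall = -1; for row in reversed(range(coord[0])): if … == "#": wall = row; break'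
def pvWallB (map : List String) (col : Int) : List Int → Int
  | [] => -1
  | r :: rs =>
    match pvChar map col r with
    | none => -1  -- IndexError in Python; excluded by Pre_
    | some ch => if ch = '#' then r else pvWallB map col rs

-- B's pass 2: 'sum(1 for r in range(wall+1, coord[0]) if map[r][coord[1]] == "O")'
def pvCountB (map : List String) (col : Int) (rs : List Int) : Int :=
  rs.foldl (fun acc r => if pvChar map col r = some 'O' then acc + 1 else acc) 0

def calc_force_north_alt (coord : Int × Int) (map : List String) : Int :=
  let wall := pvWallB map coord.2 ((PySem.List.pyRange 0 coord.1 1).reverse)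
  let num_obs := pvCountB map coord.2 (PySem.List.pyRange (wall + 1) coord.1 1)
  let f_max := if 0 ≤ wall then (map.length : Int) - wall - 1 else (map.length : Int)
  f_max - num_obs

-- ===== PRECONDITION & SPEC =====
-- Pre_ excludes exactly the inputs on which A raises IndexError: some row that A's reverse
-- scan actually reaches (above the coordinate, with no '#' cell between it and the coordinate)
-- is missing or lacks column coord[1].  (B raises the same IndexError on those inputs.)
def Pre_calc_force_north (coord : Int × Int) (map : List String) : Prop :=
  (0 < coord.1 → coord.1 ≤ (map.length : Int)) ∧
  ∀ r : Nat, r < map.length → (r : Int) < coord.1 →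
    ((pvChar map coord.2 (r : Int)).isSome ∨
      ∃ s : Nat, s < map.length ∧ (s : Int) < coord.1 ∧ r < s ∧
        pvChar map coord.2 (s : Int) = some '#')
instance (coord : Int × Int) (map : List String) : Decidable (Pre_calc_force_north coord map) := by
  unfold Pre_calc_force_north; infer_instance

def pvWitness_calc_force_north : (Int × Int) × List String := ((3, 0), ["x", "#O", "OO", ".."])

def Spec_calc_force_north (coord : Int × Int) (map : List String) (out : Int) : Prop := out = calc_force_north_alt coord map
instance (coord : Int × Int) (map : List String) (out : Int) : Decidable (Spec_calc_force_north coord map out) := by unfold Spec_calc_force_north; infer_instance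

-- ===== CLAIM (what is proved, stated in full; the proofs are below) =====
def Claim_equal_calc_force_north : Prop := ∀ (coord : Int × Int) (map : List String), Dom_calc_force_north coord map → Pre_calc_force_north coord map → Spec_calc_force_north coord map (calc_force_north coord map)

-- ===== LEMMAS AND PROOFS =====

-- the reversed range [k-1, …, 0] peels its top element
lemma pvRev_succ (k : Nat) :
    (PySem.List.pyRange 0 ((k : Int) + 1) 1).reverse =
      (k : Int) :: (PySem.List.pyRange 0 (k : Int) 1).reverse := by
  rw [PySem.List.pyRange_one_succ_right (by positivity)]
  simp

-- B's wall is always in [-1, k)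
lemma pvWallB_lt (map : List String) (col : Int) (k : Nat) :
    -1 ≤ pvWallB map col ((PySem.List.pyRange 0 (k : Int) 1).reverse) ∧
      pvWallB map col ((PySem.List.pyRange 0 (k : Int) 1).reverse) < (k : Int) := by
  induction k with
  | zero =>
      rw [Nat.cast_zero, PySem.List.pyRange_one_eq_nil le_rfl]
      simp only [List.reverse_nil, pvWallB]
      constructor <;> omega
  | succ k ih =>
      rw [show ((k + 1 : Nat) : Int) = (k : Int) + 1 from by push_cast; ring, pvRev_succ]
      cases hc : pvChar map col (k : Int) with
      | none => simp only [pvWallB, hc]; constructor <;> omega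
      | some ch =>
          simp only [pvWallB, hc]
          by_cases h : ch = '#'
          · simp only [if_pos h]; constructor <;> omega
          · simp only [if_neg h]
            exact ⟨ih.1, by have := ih.2; omega⟩

-- counting over a range extended on the right by its end point
lemma pvCountB_snoc (map : List String) (col a b : Int) (hab : a ≤ b) :
    pvCountB map col (PySem.List.pyRange a (b + 1) 1) =
      pvCountB map col (PySem.List.pyRange a b 1) +
        (if pvChar map col b = some 'O' then 1 else 0) := by
  unfold pvCountB
  rw [PySem.List.pyRange_one_succ_right hab, List.foldl_append]
  simp only [List.foldl_cons, List.foldl_nil]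
  split_ifs <;> ring

-- the heart of the file: A's fused loop over [k-1,…,0] (with accumulator num) equals
-- B's wall-then-count decomposition, whenever every cell the scan reaches is in range
lemma pvMain (map : List String) (col : Int) :
    ∀ k : Nat,
      (∀ r : Nat, r < k →
        (∀ s : Nat, s < k → r < s → pvChar map col (s : Int) ≠ some '#') →
        (pvChar map col (r : Int)).isSome) →
      ∀ num : Int,
        pvLoopA map col (map.length : Int) num ((PySem.List.pyRange 0 (k : Int) 1).reverse) =
          (if 0 ≤ pvWallB map col ((PySem.List.pyRange 0 (k : Int) 1).reverse)
             then (map.length : Int) - pvWallB map col ((PySem.List.pyRange 0 (k : Int) 1).reverse) - 1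
             else (map.length : Int)) -
            pvCountB map col
              (PySem.List.pyRange (pvWallB map col ((PySem.List.pyRange 0 (k : Int) 1).reverse) + 1) (k : Int) 1) -
            num := by
  intro k
  induction k with
  | zero =>
      intro _ num
      rw [Nat.cast_zero, PySem.List.pyRange_one_eq_nil le_rfl]
      simp only [List.reverse_nil, pvLoopA, pvWallB]
      rw [PySem.List.pyRange_one_eq_nil (by omega : (0:Int) ≤ -1 + 1)]
      simp [pvCountB]
  | succ k ih =>
      intro hpre num
      rw [show ((k + 1 : Nat) : Int) = (k : Int) + 1 from by push_cast; ring, pvRev_succ]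
      have htop : (pvChar map col (k : Int)).isSome := by
        apply hpre k (Nat.lt_succ_self k)
        intro s hs hks
        exact absurd hs (by omega)
      obtain ⟨ch, hch⟩ := Option.isSome_iff_exists.mp htop
      simp only [pvLoopA, pvWallB, hch]
      by_cases hH : ch = '#'
      · -- wall found at the top row: A returns at once, B's count range is empty
        subst hH
        simp only [Char.reduceEq, reduceIte]
        rw [if_pos (by positivity : (0:Int) ≤ (k : Int))]
        rw [PySem.List.pyRange_one_eq_nil (le_refl ((k : Int) + 1))]
        simp only [pvCountB, List.foldl_nil]
        ring
      · -- no wall at the top row: both sides reduce to the same data over [k-1,…,0]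
        simp only [if_neg hH]
        have hpre' : ∀ r : Nat, r < k →
            (∀ s : Nat, s < k → r < s → pvChar map col (s : Int) ≠ some '#') →
            (pvChar map col (r : Int)).isSome := by
          intro r hr hno
          apply hpre r (Nat.lt_succ_of_lt hr)
          intro s hs hrs
          rcases Nat.lt_succ_iff_lt_or_eq.mp hs with h | h
          · exact hno s h hrs
          · subst h; rw [hch]; simp [hH]
        have hwall := pvWallB_lt map col k
        have hcnt := pvCountB_snoc map col
          (pvWallB map col ((PySem.List.pyRange 0 (k : Int) 1).reverse) + 1) (k : Int) (by omega)
        rw [hcnt, hch]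
        by_cases hO : ch = 'O'
        · subst hO
          simp only [reduceIte]
          rw [ih hpre' (num + 1)]
          ring
        · simp only [if_neg hO, show (some ch = some 'O') = False from by simp [hO], if_false]
          rw [ih hpre' num]
          ring

-- ===== VERDICT (by name: the statement is the Claim_ definition above) =====
theorem calc_force_north_spec : Claim_equal_calc_force_north := by
  intro coord map _ hpre
  unfold Spec_calc_force_north calc_force_north
  simp only [calc_force_north_alt]
  by_cases h0 : coord.1 ≤ 0
  · -- empty scan: A returns len(map), B's wall is -1 and its count range is empty
    rw [PySem.List.pyRange_one_eq_nil h0]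
    simp only [List.reverse_nil, pvLoopA, pvWallB]
    rw [PySem.List.pyRange_one_eq_nil (by omega : coord.1 ≤ -1 + 1)]
    simp [pvCountB]
  · set k := coord.1.toNat with hk
    have hcoord : coord.1 = (k : Int) := by omega
    have hklen : k ≤ map.length := by
      have := hpre.1 (by omega)
      omega
    have hpre2 : ∀ r : Nat, r < k →
        (∀ s : Nat, s < k → r < s → pvChar map coord.2 (s : Int) ≠ some '#') →
        (pvChar map coord.2 (r : Int)).isSome := by
      intro r hr hno
      rcases hpre.2 r (by omega) (by omega) with h | ⟨s, _, hsc, hrs, hsh⟩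
      · exact h
      · exact absurd hsh (hno s (by omega) hrs)
    rw [hcoord]
    rw [pvMain map coord.2 k hpre2 0]
    simp
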